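-- pv_equiv track=rewrite | github.com/nguyenhachuy/leetcode | 488-zuma-game.py | compress_board
-- ===== SOURCE A (Python) =====
-- def compress_board(board):
--     board = list(board)
--     for i in range(len(board)):
--         j = i + 1
--         while j < len(board) and board[j] == board[i]:
--             j += 1
--         if j <= len(board) and j-i >= 3:
--             for k in range(i,j):
--                 board[k] = ""
--
--     return "".join(board)
-- ===== SOURCE B (Python) =====
-- def compress_board(board):
--     # Single left-to-right pass with a run accumulator: keep runs shorter than 3.
--     pieces = []
--     run_ch = None
--     run_len = 0
--     for ch in board:
--         if ch == run_ch:
--             run_len += 1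
--         else:
--             if 0 < run_len < 3:
--                 pieces.append(run_ch * run_len)
--             run_ch, run_len = ch, 1
--     if 0 < run_len < 3:
--         pieces.append(run_ch * run_len)
--     return "".join(pieces)
-- ===== Notes on version B (the rewrite author's own statement) =====
-- stated objective: faster
-- what changed: Replaces A's per-index rescans of each run with in-place blanking of a mutable cell list by a single forward pass that groups consecutive equal characters in a run accumulator and keeps only runs shorter than 3.
import Mathlib
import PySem

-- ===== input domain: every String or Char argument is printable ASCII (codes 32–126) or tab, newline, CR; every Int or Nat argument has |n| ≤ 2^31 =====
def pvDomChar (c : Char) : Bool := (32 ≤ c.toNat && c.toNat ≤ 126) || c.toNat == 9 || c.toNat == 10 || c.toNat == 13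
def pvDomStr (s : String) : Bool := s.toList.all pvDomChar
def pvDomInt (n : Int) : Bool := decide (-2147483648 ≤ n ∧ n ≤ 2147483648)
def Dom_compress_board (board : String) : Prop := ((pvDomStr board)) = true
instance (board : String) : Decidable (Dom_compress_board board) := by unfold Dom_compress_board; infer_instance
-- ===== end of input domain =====

-- B replaces A's per-index rescans with in-place blanking by a single forward pass
-- grouping consecutive equal characters and keeping runs of length < 3.

-- ===== PORT A =====
-- A turns the string into a list of one-char strings and overwrites removed cells with "".
-- Modelled exactly as List (Option Char): some c = the one-char string, none = "";
-- Python's == on these values coincides with equality of Option Char, and "".join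
-- concatenates exactly the non-"" cells in order, i.e. filterMap id.

-- the inner `while j < len(board) and board[j] == board[i]:` loop
def pvWhileA (b : List (Option Char)) (i j : Nat) : Nat :=
  if h : j < b.length then
    if b.getD j none = b.getD i none then pvWhileA b i (j + 1) else j
  else j
termination_by b.length - j

-- one iteration of A's outer `for i in range(len(board)):` loop body
def pvStepA (b : List (Option Char)) (i : Nat) : List (Option Char) :=
  let j := pvWhileA b i (i + 1)
  if j ≤ b.length ∧ 3 ≤ j - i then
    (List.range' i (j - i)).foldl (fun acc k => acc.set k none) b
  else b

def compress_board (board : String) : String :=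
  let b0 := board.toList.map (fun c => some c)
  let bf := (List.range b0.length).foldl pvStepA b0
  String.mk (bf.filterMap id)

-- ===== PORT B =====
-- `if 0 < run_len < 3: pieces.append(run_ch * run_len)` (run_ch is None only while
-- run_len = 0, so the 0 < run_len guard keeps the match total)
def pvFlushB (out : List Char) (rc : Option Char) (rl : Nat) : List Char :=
  if 0 < rl ∧ rl < 3 then
    match rc with
    | some c => out ++ List.replicate rl c
    | none => out
  else out

-- loop body of B's `for ch in board:`
def pvStepB (st : List Char × Option Char × Nat) (ch : Char) :
    List Char × Option Char × Nat :=
  match st with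
  | (out, rc, rl) =>
    if (some ch = rc) then (out, rc, rl + 1)
    else (pvFlushB out rc rl, some ch, 1)

def compress_board_alt (board : String) : String :=
  match board.toList.foldl pvStepB ([], none, 0) with
  | (out, rc, rl) => String.mk (pvFlushB out rc rl)

-- ===== PRECONDITION & SPEC =====
def Spec_compress_board (board : String) (out : String) : Prop := out = compress_board_alt board
instance (board : String) (out : String) : Decidable (Spec_compress_board board out) := by unfold Spec_compress_board; infer_instance

-- ===== CLAIM (what is proved, stated in full; the proofs are below) =====
def Claim_equal_compress_board : Prop := ∀ (board : String), Dom_compress_board board → Spec_compress_board board (compress_board board)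

-- ===== LEMMAS AND PROOFS =====



theorem pvWhileA_ge (b : List (Option Char)) (i : Nat) : ∀ j, j ≤ pvWhileA b i j := by
  suffices H : ∀ n j, b.length - j = n → j ≤ pvWhileA b i j by
    intro j; exact H _ j rfl
  intro n
  induction n using Nat.strong_induction_on with
  | _ n IH =>
    intro j hn
    rw [pvWhileA]
    by_cases hlt : j < b.length
    · rw [dif_pos hlt]
      split
      · have := IH (b.length - (j + 1)) (by omega) (j + 1) rfl; omega
      · exact le_rfl
    · rw [dif_neg hlt]
  
def pvSpanLen (c : Char) : List Char → Nat
  | [] => 0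
  | x :: xs => if x = c then 1 + pvSpanLen c xs else 0

def pvRef : List Char → List Char
  | [] => []
  | c :: xs =>
    let t := pvSpanLen c xs
    if t + 1 < 3 then List.replicate (t + 1) c ++ pvRef (xs.drop t)
    else pvRef (xs.drop t)
termination_by l => l.length
decreasing_by
  all_goals
    have h : (List.drop (pvSpanLen c xs) xs).length ≤ xs.length := by
      simp
    simp only [List.length_cons]
    omega

theorem pvSpan_decomp (c : Char) (xs : List Char) :
    xs = List.replicate (pvSpanLen c xs) c ++ xs.drop (pvSpanLen c xs) := by
  induction xs with
  | nil => rfl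
  | cons x xs ih =>
    by_cases hx : x = c
    · subst hx
      simp only [pvSpanLen, if_pos rfl, Nat.add_comm 1, List.replicate_succ, List.drop_succ_cons,
        List.cons_append]
      exact congrArg _ ih
    · simp [pvSpanLen, hx]

theorem pvSpan_head (c : Char) (xs : List Char) (d : Char)
    (h : (xs.drop (pvSpanLen c xs)).head? = some d) : d ≠ c := by
  induction xs with
  | nil => simp [pvSpanLen] at h
  | cons x xs ih =>
    by_cases hx : x = c
    · subst hx
      simp only [pvSpanLen, if_pos rfl, Nat.add_comm 1, List.drop_succ_cons] at h
      exact ih h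
    · simp only [pvSpanLen, if_neg hx, List.drop_zero, List.head?_cons, Option.some_inj] at h
      subst h; exact hx

theorem pv_getD_shift (p r : List (Option Char)) (k : Nat) :
    (p ++ r).getD (p.length + k) none = r.getD k none := by
  simp [List.getD, List.getElem?_append_right]

theorem pv_set_shift (p r : List (Option Char)) (k : Nat) (v : Option Char) :
    (p ++ r).set (p.length + k) v = p ++ r.set k v := by simp

theorem pv_set_none_id (l : List (Option Char)) (k : Nat) (h : l.getD k none = none) :
    l.set k none = l := by
  apply List.ext_getElem <;> simp
  intro i hi hi2
  by_cases hk : k = i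
  · subst hk
    rw [List.getElem_set_self]
    rw [List.getD_eq_getElem l none hi2] at h
    exact h.symm
  · rw [List.getElem_set_ne hk]

theorem pvWhileA_shift (p r : List (Option Char)) (i : Nat) (hi : p.length ≤ i) :
    ∀ j, p.length ≤ j →
      pvWhileA (p ++ r) i j = p.length + pvWhileA r (i - p.length) (j - p.length) := by
  have hgi : (p ++ r).getD i none = r.getD (i - p.length) none := by
    have := pv_getD_shift p r (i - p.length)
    rwa [Nat.add_sub_cancel' hi] at this
  suffices H : ∀ n j, (p ++ r).length - j = n → p.length ≤ j →
      pvWhileA (p ++ r) i j = p.length + pvWhileA r (i - p.length) (j - p.length) by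
    intro j hj; exact H _ j rfl hj
  intro n
  induction n using Nat.strong_induction_on with
  | _ n IH =>
    intro j hn hj
    conv_lhs => rw [pvWhileA]
    conv_rhs => rw [pvWhileA]
    have hlen : (p ++ r).length = p.length + r.length := by simp
    by_cases hlt : j < (p ++ r).length
    · have hlt' : j - p.length < r.length := by omega
      rw [dif_pos hlt, dif_pos hlt']
      have hgj : (p ++ r).getD j none = r.getD (j - p.length) none := by
        have := pv_getD_shift p r (j - p.length)
        rwa [Nat.add_sub_cancel' hj] at this
      rw [hgj, hgi]
      by_cases he : r.getD (j - p.length) none = r.getD (i - p.length) none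
      · rw [if_pos he, if_pos he]
        have heq : j - p.length + 1 = (j + 1) - p.length := by omega
        rw [heq]
        exact IH ((p ++ r).length - (j + 1)) (by omega) (j + 1) rfl (by omega)
      · rw [if_neg he, if_neg he]; omega
    · have hlt' : ¬ (j - p.length < r.length) := by omega
      rw [dif_neg hlt, dif_neg hlt']; omega

theorem pv_blankfold_shift (p : List (Option Char)) :
    ∀ (m s : Nat) (r : List (Option Char)),
      (List.range' (p.length + s) m).foldl (fun acc k => acc.set k none) (p ++ r)
        = p ++ (List.range' s m).foldl (fun acc k => acc.set k none) r := by
  intro m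
  induction m with
  | zero => simp
  | succ m ih =>
    intro s r
    rw [List.range'_succ, List.range'_succ]
    simp only [List.foldl_cons]
    rw [pv_set_shift]
    have := ih (s + 1) (r.set s none)
    rw [← Nat.add_assoc] at this
    exact this

theorem pvStepA_shift (p r : List (Option Char)) (i : Nat) (hi : p.length ≤ i) :
    pvStepA (p ++ r) i = p ++ pvStepA r (i - p.length) := by
  unfold pvStepA
  rw [pvWhileA_shift p r i hi (i + 1) (by omega)]
  have h1 : (i + 1) - p.length = (i - p.length) + 1 := by omega
  rw [h1]
  set j' := pvWhileA r (i - p.length) ((i - p.length) + 1) with hj'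
  have hlen : (p ++ r).length = p.length + r.length := by simp
  have hj'ge : i - p.length + 1 ≤ j' := pvWhileA_ge r _ _
  by_cases hc : j' ≤ r.length ∧ 3 ≤ j' - (i - p.length)
  · have hc' : p.length + j' ≤ (p ++ r).length ∧ 3 ≤ (p.length + j') - i := by
      constructor <;> omega
    rw [if_pos hc', if_pos hc]
    have h2 : (p.length + j') - i = j' - (i - p.length) := by omega
    rw [h2]
    have hb := pv_blankfold_shift p (j' - (i - p.length)) (i - p.length) r
    rw [Nat.add_sub_cancel' hi] at hb
    exact hb
  · have hc' : ¬ (p.length + j' ≤ (p ++ r).length ∧ 3 ≤ (p.length + j') - i) := by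
      intro ⟨a, b⟩; exact hc ⟨by omega, by omega⟩
    rw [if_neg hc', if_neg hc]

theorem pv_stepfold_shift (p : List (Option Char)) :
    ∀ (m s : Nat) (r : List (Option Char)),
      (List.range' (p.length + s) m).foldl pvStepA (p ++ r)
        = p ++ (List.range' s m).foldl pvStepA r := by
  intro m
  induction m with
  | zero => simp
  | succ m ih =>
    intro s r
    rw [List.range'_succ, List.range'_succ]
    simp only [List.foldl_cons]
    rw [pvStepA_shift p r (p.length + s) (by omega), Nat.add_sub_cancel_left]
    have := ih (s + 1) (pvStepA r s)
    rw [← Nat.add_assoc] at this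
    exact this

theorem pv_getD_run (v : Option Char) (k : Nat) (r : List (Option Char)) (idx : Nat)
    (h : idx < k) : (List.replicate k v ++ r).getD idx none = v := by
  rw [List.getD, List.getElem?_append_left (by simpa using h)]
  simp [List.getElem?_replicate, h]

theorem pvWhileA_run (v : Option Char) (k : Nat) (r : List (Option Char)) (i : Nat)
    (hi : i < k) (hr : ∀ w, r.getD 0 none = w → r ≠ [] → w ≠ v) :
    ∀ j, i < j → j ≤ k → pvWhileA (List.replicate k v ++ r) i j = k := by
  have hgi : (List.replicate k v ++ r).getD i none = v := pv_getD_run v k r i hi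
  have hlen : (List.replicate k v ++ r).length = k + r.length := by simp
  suffices H : ∀ n j, k - j = n → i < j → j ≤ k →
      pvWhileA (List.replicate k v ++ r) i j = k by
    intro j h1 h2; exact H _ j rfl h1 h2
  intro n
  induction n using Nat.strong_induction_on with
  | _ n IH =>
    intro j hn hij hjk
    rw [pvWhileA]
    by_cases hjlt : j < k
    · rw [dif_pos (by omega)]
      rw [pv_getD_run v k r j hjlt, hgi, if_pos rfl]
      exact IH (k - (j + 1)) (by omega) (j + 1) rfl (by omega) (by omega)
    · have hjk' : j = k := by omega
      by_cases hrr : r = []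
      · subst hrr
        rw [dif_neg (by simp; omega)]
        exact hjk'
      · rw [dif_pos (by
          have : 0 < r.length := List.length_pos_iff.mpr hrr
          omega)]
        have hgk : (List.replicate k v ++ r).getD j none = r.getD 0 none := by
          have h0 := pv_getD_shift (List.replicate k v) r 0
          simp only [List.length_replicate, Nat.add_zero] at h0
          rw [hjk']; exact h0
        rw [hgk, hgi, if_neg (hr _ rfl hrr)]
        exact hjk'

theorem pv_blank_run0 (c : Char) :
    ∀ (k : Nat) (r : List (Option Char)),
      (List.range' 0 k).foldl (fun acc i => acc.set i none) (List.replicate k (some c) ++ r)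
        = List.replicate k none ++ r := by
  intro k
  induction k with
  | zero => simp
  | succ k ih =>
    intro r
    rw [List.range'_succ]
    simp only [List.foldl_cons, List.replicate_succ, List.cons_append, List.set_cons_zero]
    have hsh := pv_blankfold_shift [none] k 0 (List.replicate k (some c) ++ r)
    simp only [List.length_cons, List.length_nil, Nat.zero_add, List.singleton_append] at hsh
    rw [Nat.add_zero] at hsh
    rw [hsh, ih r]

theorem pv_blank_noop :
    ∀ (m s : Nat) (b : List (Option Char)),
      (∀ idx, s ≤ idx → idx < s + m → b.getD idx none = none) →
      (List.range' s m).foldl (fun acc i => acc.set i none) b = b := by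
  intro m
  induction m with
  | zero => simp
  | succ m ih =>
    intro s b hb
    rw [List.range'_succ]
    simp only [List.foldl_cons]
    rw [pv_set_none_id b s (hb s le_rfl (by omega))]
    exact ih (s + 1) b (fun idx h1 h2 => hb idx (by omega) (by omega))

theorem pv_hr_some (c : Char) (rest : List Char) (hhd : ∀ d, rest.head? = some d → d ≠ c) :
    ∀ w, (rest.map some).getD 0 none = w → rest.map some ≠ [] → w ≠ some c := by
  intro w hw hne
  cases rest with
  | nil => simp at hne
  | cons d tl =>
    simp only [List.map_cons, List.getD, List.getElem?_cons_zero, Option.getD_some] at hw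
    subst hw
    simp only [ne_eq, Option.some_inj]
    exact hhd d rfl

theorem pv_hr_none (rest : List Char) :
    ∀ w, (rest.map some).getD 0 none = w → rest.map some ≠ [] → w ≠ none := by
  intro w hw hne
  cases rest with
  | nil => simp at hne
  | cons d tl =>
    simp only [List.map_cons, List.getD, List.getElem?_cons_zero, Option.getD_some] at hw
    subst hw
    simp

theorem pv_foldl_fix {α β : Type} (f : α → β → α) (b : α) (L : List β)
    (h : ∀ x ∈ L, f b x = b) : L.foldl f b = b := by
  induction L with
  | nil => rfl
  | cons x xs ih =>
    simp only [List.foldl_cons, h x (by simp)]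
    exact ih (fun y hy => h y (by simp [hy]))

theorem pv_step_start (c : Char) (k : Nat) (rest : List Char) (hk : 1 ≤ k)
    (hhd : ∀ d, rest.head? = some d → d ≠ c) :
    pvStepA (List.replicate k (some c) ++ rest.map some) 0 =
      (if k < 3 then List.replicate k (some c) else List.replicate k none) ++ rest.map some := by
  unfold pvStepA
  have hj := pvWhileA_run (some c) k (rest.map some) 0 (by omega) (pv_hr_some c rest hhd)
    1 (by omega) (by omega)
  simp only [hj]
  have hlen : (List.replicate k (some c) ++ rest.map some).length = k + rest.length := by simp
  by_cases h3 : k < 3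
  · rw [if_neg (by omega), if_pos h3]
  · rw [if_pos ⟨by omega, by omega⟩, if_neg h3]
    rw [Nat.sub_zero]
    exact pv_blank_run0 c k (rest.map some)

theorem pv_noop_two (c : Char) (rest : List Char)
    (hhd : ∀ d, rest.head? = some d → d ≠ c) :
    pvStepA (List.replicate 2 (some c) ++ rest.map some) 1 =
      List.replicate 2 (some c) ++ rest.map some := by
  unfold pvStepA
  have hj := pvWhileA_run (some c) 2 (rest.map some) 1 (by omega) (pv_hr_some c rest hhd)
    2 (by omega) (by omega)
  simp only [hj]
  rw [if_neg (by omega)]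

theorem pv_noop_none (k : Nat) (rest : List Char) (i : Nat) (h1 : 1 ≤ i) (h2 : i < k) :
    pvStepA (List.replicate k none ++ rest.map some) i =
      List.replicate k none ++ rest.map some := by
  unfold pvStepA
  have hj := pvWhileA_run none k (rest.map some) i h2 (pv_hr_none rest)
    (i + 1) (by omega) (by omega)
  simp only [hj]
  by_cases h3 : k ≤ (List.replicate (n := k) (none (α := Char)) ++ rest.map some).length ∧ 3 ≤ k - i
  · rw [if_pos h3]
    exact pv_blank_noop (k - i) i _ (fun idx hi1 hi2 =>
      pv_getD_run none k (rest.map some) idx (by omega))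
  · rw [if_neg h3]

theorem pv_phase1 (c : Char) (k : Nat) (rest : List Char) (hk : 1 ≤ k)
    (hhd : ∀ d, rest.head? = some d → d ≠ c) :
    (List.range' 0 k).foldl pvStepA (List.replicate k (some c) ++ rest.map some)
      = (if k < 3 then List.replicate k (some c) else List.replicate k none) ++ rest.map some := by
  obtain ⟨k', rfl⟩ : ∃ k', k = k' + 1 := ⟨k - 1, by omega⟩
  rw [List.range'_succ, List.foldl_cons, pv_step_start c _ rest hk hhd]
  by_cases h3 : k' + 1 < 3
  · rw [if_pos h3]
    have hk2 : k' < 2 := by omega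
    interval_cases k'
    · simp
    · show (List.range' 1 1).foldl pvStepA _ = _
      simp only [List.range'_one, List.foldl_cons, List.foldl_nil]
      exact pv_noop_two c rest hhd
  · rw [if_neg h3]
    exact pv_foldl_fix _ _ _ (fun i hi => by
      rw [List.mem_range'_1] at hi
      exact pv_noop_none (k' + 1) rest i hi.1 (by omega))

theorem pv_filterMap_some (k : Nat) (c : Char) :
    (List.replicate k (some c)).filterMap id = List.replicate k c := by
  induction k with
  | zero => rfl
  | succ k ih => simp [List.replicate_succ, ih]

theorem pv_filterMap_none (k : Nat) :
    (List.replicate k (none : Option Char)).filterMap id = [] := by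
  induction k with
  | zero => rfl
  | succ k ih => simp [List.replicate_succ, ih]

theorem pvA_ref : ∀ (l : List Char),
    ((List.range l.length).foldl pvStepA (l.map some)).filterMap id = pvRef l := by
  suffices H : ∀ n l, l.length = n →
      ((List.range l.length).foldl pvStepA (l.map some)).filterMap id = pvRef l by
    intro l; exact H _ l rfl
  intro n
  induction n using Nat.strong_induction_on with
  | _ n IH =>
    intro l hn
    match l with
    | [] => simp [pvRef]
    | c :: xs =>
      set t := pvSpanLen c xs with ht
      set rest := xs.drop t with hrest
      have hdec : c :: xs = List.replicate (t + 1) c ++ rest := by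
        conv_lhs => rw [pvSpan_decomp c xs]
        rfl
      have hlen : (c :: xs).length = (t + 1) + rest.length := by
        conv_lhs => rw [hdec]
        simp
      have hmap : (c :: xs).map some = List.replicate (t + 1) (some c) ++ rest.map some := by
        conv_lhs => rw [hdec]
        simp
      have hhd : ∀ d, rest.head? = some d → d ≠ c := fun d hd => pvSpan_head c xs d hd
      have hrl : rest.length < n := by
        rw [← hn, hlen]; omega
      rw [hmap, hlen, List.range_eq_range']
      have hra : List.range' 0 (t + 1) ++ List.range' (t + 1) rest.length
          = List.range' 0 ((t + 1) + rest.length) := by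
        have := @List.range'_append (s := 0) (m := t + 1) (n := rest.length) (step := 1)
        simpa using this
      rw [← hra]
      rw [List.foldl_append]
      rw [pv_phase1 c (t + 1) rest (by omega) hhd]
      set B := (if t + 1 < 3 then List.replicate (t + 1) (some c) else List.replicate (t + 1) none)
        with hB
      have hBlen : B.length = t + 1 := by
        rw [hB]; split <;> simp
      have hp2 := pv_stepfold_shift B rest.length 0 (rest.map some)
      rw [hBlen, Nat.add_zero] at hp2
      rw [hp2, List.filterMap_append]
      have hIH := IH rest.length hrl rest rfl
      rw [List.range_eq_range'] at hIH
      rw [hIH]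
      rw [pvRef]
      show (B.filterMap id) ++ pvRef rest
        = if pvSpanLen c xs + 1 < 3 then List.replicate (pvSpanLen c xs + 1) c ++ pvRef (xs.drop (pvSpanLen c xs))
          else pvRef (xs.drop (pvSpanLen c xs))
      rw [← ht, ← hrest]
      by_cases h3 : t + 1 < 3
      · rw [if_pos h3, hB, if_pos h3, pv_filterMap_some]
      · rw [if_neg h3, hB, if_neg h3, pv_filterMap_none]
        simp



theorem pvB_runfold (c : Char) : ∀ (t : Nat) (out : List Char) (m : Nat),
    (List.replicate t c).foldl pvStepB (out, some c, m) = (out, some c, m + t) := by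
  intro t
  induction t with
  | zero => simp
  | succ t ih =>
    intro out m
    rw [List.replicate_succ, List.foldl_cons]
    show (List.replicate t c).foldl pvStepB (pvStepB (out, some c, m) c) = _
    rw [pvStepB, if_pos rfl]
    rw [ih out (m + 1)]
    have hmt : m + 1 + t = m + (t + 1) := by omega
    rw [hmt]

theorem pvB_main : ∀ (l : List Char) (out : List Char) (c : Char) (m : Nat), 0 < m →
    (∀ d, l.head? = some d → d ≠ c) →
    (match l.foldl pvStepB (out, some c, m) with
     | (o, rc, rl) => pvFlushB o rc rl) = pvFlushB out (some c) m ++ pvRef l := by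
  suffices H : ∀ n l, l.length = n → ∀ (out : List Char) (c : Char) (m : Nat), 0 < m →
      (∀ d, l.head? = some d → d ≠ c) →
      (match l.foldl pvStepB (out, some c, m) with
       | (o, rc, rl) => pvFlushB o rc rl) = pvFlushB out (some c) m ++ pvRef l by
    intro l; exact H _ l rfl
  intro n
  induction n using Nat.strong_induction_on with
  | _ n IH =>
    intro l hn out c m hm hhd
    match l with
    | [] => simp [pvRef]
    | d :: xs =>
      have hdc : d ≠ c := hhd d rfl
      set t := pvSpanLen d xs with ht
      set rest := xs.drop t with hrest
      have hdec : xs = List.replicate t d ++ rest := pvSpan_decomp d xs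
      have hhd' : ∀ e, rest.head? = some e → e ≠ d := fun e he => pvSpan_head d xs e he
      have hrl : rest.length < n := by
        rw [← hn]
        conv_rhs => rw [hdec]
        simp
      rw [List.foldl_cons]
      show (match xs.foldl pvStepB (pvStepB (out, some c, m) d) with
            | (o, rc, rl) => pvFlushB o rc rl) = _
      rw [pvStepB, if_neg (by simpa using hdc)]
      conv_lhs => rw [hdec]
      rw [List.foldl_append, pvB_runfold d t (pvFlushB out (some c) m) 1]
      rw [IH rest.length hrl rest rfl (pvFlushB out (some c) m) d (1 + t) (by omega) hhd']
      rw [pvRef]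
      show pvFlushB (pvFlushB out (some c) m) (some d) (1 + t) ++ pvRef rest
        = pvFlushB out (some c) m ++
            (if pvSpanLen d xs + 1 < 3 then
              List.replicate (pvSpanLen d xs + 1) d ++ pvRef (xs.drop (pvSpanLen d xs))
             else pvRef (xs.drop (pvSpanLen d xs)))
      rw [← ht, ← hrest]
      by_cases h3 : t + 1 < 3
      · rw [if_pos h3]
        rw [pvFlushB, if_pos ⟨by omega, by omega⟩]
        have : 1 + t = t + 1 := by omega
        rw [this, List.append_assoc]
      · rw [if_neg h3]
        rw [pvFlushB, if_neg (by omega)]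

theorem pvB_ref (l : List Char) :
    (match l.foldl pvStepB ([], none, 0) with
     | (o, rc, rl) => pvFlushB o rc rl) = pvRef l := by
  match l with
  | [] => simp [pvRef, pvFlushB]
  | c :: xs =>
    set t := pvSpanLen c xs with ht
    set rest := xs.drop t with hrest
    have hdec : xs = List.replicate t c ++ rest := pvSpan_decomp c xs
    have hhd' : ∀ e, rest.head? = some e → e ≠ c := fun e he => pvSpan_head c xs e he
    rw [List.foldl_cons]
    show (match xs.foldl pvStepB (pvStepB ([], none, 0) c) with
          | (o, rc, rl) => pvFlushB o rc rl) = _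
    rw [pvStepB, if_neg (by simp)]
    have hfl : pvFlushB [] none 0 = [] := by rw [pvFlushB, if_neg (by omega)]
    rw [hfl]
    conv_lhs => rw [hdec]
    rw [List.foldl_append, pvB_runfold c t [] 1]
    rw [pvB_main rest [] c (1 + t) (by omega) hhd']
    rw [pvRef]
    show pvFlushB [] (some c) (1 + t) ++ pvRef rest
      = (if pvSpanLen c xs + 1 < 3 then
          List.replicate (pvSpanLen c xs + 1) c ++ pvRef (xs.drop (pvSpanLen c xs))
         else pvRef (xs.drop (pvSpanLen c xs)))
    rw [← ht, ← hrest]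
    by_cases h3 : t + 1 < 3
    · rw [if_pos h3, pvFlushB, if_pos ⟨by omega, by omega⟩]
      have : 1 + t = t + 1 := by omega
      rw [this]
      simp
    · rw [if_neg h3, pvFlushB, if_neg (by omega)]
      simp

-- ===== VERDICT (by name: the statement is the Claim_ definition above) =====
theorem compress_board_spec : Claim_equal_compress_board := by
  intro board _
  show compress_board board = compress_board_alt board
  unfold compress_board compress_board_alt
  simp only [List.length_map]
  rw [pvA_ref board.toList]
  exact congrArg String.mk (pvB_ref board.toList).symm
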